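-- pv_equiv track=rewrite | github.com/vynix-ai/vynix | libs/vynix/src/vynix/services/middleware.py | _capability_covers
-- ===== SOURCE A (Python) =====
-- def _capability_covers(available: set[str], required: str) -> bool:
--     """Check if any available capability covers the required one."""
--     # Exact match
--     if required in available:
--         return True
--
--     # Wildcard matching - only on available side
--     for avail_cap in available:
--         if avail_cap.endswith("*"):
--             # Handle malformed wildcards by stripping trailing *s
--             wildcard_pattern = avail_cap.rstrip("*")
--
--             # Special case: if pattern ends with separator (., :, /), match hierarchical capabilities
--             # "api.*" should ONLY match "api.something", NOT bare "api" (strict matching)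
--             if wildcard_pattern.endswith((".", ":", "/")):
--                 # Strict hierarchical matching - separator must be present
--                 if required.startswith(wildcard_pattern):
--                     return True
--             else:
--                 # Standard prefix matching
--                 if required == wildcard_pattern or required.startswith(wildcard_pattern):
--                     return True
--
--     return False
-- ===== SOURCE B (Python) =====
-- def _capability_covers(available: set[str], required: str) -> bool:
--     """Check if any available capability covers the required one."""
--     if required in available:
--         return True
--     prefixes = {c.rstrip("*") for c in available if c.endswith("*")}
--     lengths = {len(p) for p in prefixes if len(p) <= len(required)}
--     return any(required[:l] in prefixes for l in lengths)
-- ===== Notes on version B (the rewrite author's own statement) =====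
-- stated objective: alternative
-- what changed: Instead of testing each available pattern's branch conditions against required, B builds a set of wildcard prefixes once and probes it with the prefixes of required at the lengths that occur in the set; A's separator and equality branches collapse into plain prefix matching.
import Mathlib
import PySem

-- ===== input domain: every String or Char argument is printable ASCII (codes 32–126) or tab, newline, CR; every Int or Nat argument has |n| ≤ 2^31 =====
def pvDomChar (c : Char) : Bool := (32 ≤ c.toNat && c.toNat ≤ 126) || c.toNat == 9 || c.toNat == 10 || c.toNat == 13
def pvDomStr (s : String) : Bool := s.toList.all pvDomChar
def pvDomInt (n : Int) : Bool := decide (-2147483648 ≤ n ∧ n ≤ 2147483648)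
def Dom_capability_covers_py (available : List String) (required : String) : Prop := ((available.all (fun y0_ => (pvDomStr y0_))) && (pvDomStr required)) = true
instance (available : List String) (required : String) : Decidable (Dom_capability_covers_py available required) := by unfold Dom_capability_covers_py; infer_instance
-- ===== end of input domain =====

-- B replaces A's per-pattern branch tests by a precomputed wildcard-prefix set probed with every prefix of `required` (alternative decomposition).

-- ===== PORT A =====
-- exact port of Python s.rstrip("*"): drop trailing '*' characters
def pvRstripStar (s : String) : String :=
  String.ofList ((s.toList.reverse.dropWhile (· == '*')).reverse)

-- the for-loop of A, early-returning True
def capAWildLoop (avail : List String) (required : String) : Bool :=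
  match avail with
  | [] => false
  | avail_cap :: rest =>
    if PySem.Str.endswith avail_cap "*" then
      let wildcard_pattern := pvRstripStar avail_cap
      if PySem.Str.endswith wildcard_pattern "." || PySem.Str.endswith wildcard_pattern ":"
          || PySem.Str.endswith wildcard_pattern "/" then
        if PySem.Str.startswith required wildcard_pattern then true
        else capAWildLoop rest required
      else
        if required == wildcard_pattern || PySem.Str.startswith required wildcard_pattern then true
        else capAWildLoop rest required
    else capAWildLoop rest required

def capability_covers_py (available : List String) (required : String) : Bool :=
  if available.contains required then true
  else capAWildLoop available required

-- ===== PORT B =====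
def capability_covers_py_alt (available : List String) (required : String) : Bool :=
  if available.contains required then true
  else
    let prefixes : PySem.Set String :=
      PySem.Set.ofList ((available.filter (fun c => PySem.Str.endswith c "*")).map pvRstripStar)
    let lengths : PySem.Set Nat :=
      PySem.Set.ofList
        ((prefixes.filter (fun p => decide (p.toList.length ≤ required.toList.length))).map
          (fun p => p.toList.length))
    lengths.any (fun l => prefixes.contains (String.ofList (required.toList.take l)))

-- ===== PRECONDITION & SPEC =====
def Spec_capability_covers_py (available : List String) (required : String) (out : Bool) : Prop := out = capability_covers_py_alt available required
instance (available : List String) (required : String) (out : Bool) : Decidable (Spec_capability_covers_py available required out) := by unfold Spec_capability_covers_py; infer_instance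

-- ===== CLAIM (what is proved, stated in full; the proofs are below) =====
def Claim_equal_capability_covers_py : Prop := ∀ (available : List String) (required : String), Dom_capability_covers_py available required → Spec_capability_covers_py available required (capability_covers_py available required)

-- ===== LEMMAS AND PROOFS =====

-- A's loop is an `any` of: wildcard, and the stripped pattern is a prefix of required
theorem capAWildLoop_eq_any (avail : List String) (required : String) :
    capAWildLoop avail required
      = avail.any (fun c => PySem.Str.endswith c "*"
          && PySem.Str.startswith required (pvRstripStar c)) := by
  induction avail with
  | nil => rfl
  | cons c rest ih =>
    by_cases hw : PySem.Str.endswith c "*" = true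
    · by_cases hs : PySem.Str.startswith required (pvRstripStar c) = true
      · simp only [capAWildLoop, List.any_cons, hw, Bool.true_and, hs, if_pos, Bool.true_or]
        split_ifs with hsep hcond
        · rfl
        · rfl
        · exact absurd (by simp only [Bool.or_true] : _) hcond
      · have hne : (required == pvRstripStar c) = false := by
          apply beq_eq_false_iff_ne.mpr
          intro h
          rw [h] at hs
          exact hs (by simp [PySem.Chars.startswith_iff])
        rw [Bool.not_eq_true] at hs
        simp only [capAWildLoop, List.any_cons, hw, Bool.true_and, hs, hne, Bool.false_or,
          Bool.false_eq_true, if_false, if_pos]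
        split_ifs <;> exact ih
    · rw [Bool.not_eq_true] at hw
      simp only [capAWildLoop, List.any_cons, hw, Bool.false_and, Bool.false_eq_true, if_false,
        Bool.false_or]
      exact ih

theorem capability_covers_py_eq (available : List String) (required : String) :
    capability_covers_py available required = capability_covers_py_alt available required := by
  unfold capability_covers_py capability_covers_py_alt
  by_cases hm : required ∈ available
  · rw [if_pos (List.contains_iff_mem.mpr hm), if_pos (List.contains_iff_mem.mpr hm)]
  · rw [if_neg (fun hc => hm (List.contains_iff_mem.mp hc)),
        if_neg (fun hc => hm (List.contains_iff_mem.mp hc))]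
    rw [capAWildLoop_eq_any, Bool.eq_iff_iff]
    simp only [List.any_eq_true, Bool.and_eq_true, PySem.Set.contains, List.contains_iff_mem,
      PySem.Set.mem_ofList, List.mem_map, List.mem_filter, decide_eq_true_eq]
    constructor
    · rintro ⟨c, hc, hw, hs⟩
      have hpre : (pvRstripStar c).toList <+: required.toList := by
        rw [PySem.Str.startswith_eq, PySem.Chars.startswith_iff] at hs; exact hs
      refine ⟨(pvRstripStar c).toList.length,
        ⟨pvRstripStar c, ⟨⟨c, ⟨hc, hw⟩, rfl⟩, hpre.length_le⟩, rfl⟩,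
        c, ⟨hc, hw⟩, ?_⟩
      rw [← List.prefix_iff_eq_take.mp hpre]; simp
    · rintro ⟨l, ⟨p, ⟨⟨c', hc', rfl⟩, hle⟩, rfl⟩, c, ⟨hc, hw⟩, heq⟩
      refine ⟨c, hc, hw, ?_⟩
      rw [PySem.Str.startswith_eq, PySem.Chars.startswith_iff]
      have h2 : (pvRstripStar c).toList
          = required.toList.take ((pvRstripStar c').toList.length) := by
        rw [heq]; simp
      rw [h2]; exact List.take_prefix _ _

-- ===== VERDICT (by name: the statement is the Claim_ definition above) =====
theorem capability_covers_py_spec : Claim_equal_capability_covers_py := by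
  intro available required _
  exact capability_covers_py_eq available required
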